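-- pv_equiv track=rewrite | github.com/souravjain540/Basic-Python-Programs | reverse32bitsignedint.py | reverse32bitsignedint
-- ===== SOURCE A (Python) =====
-- def reverse32bitsignedint(n):
--     is_negative = 0
--     if n < 0:
--         is_negative = 1
--         n = -n
--     ans = 0
--     while n:
--         quotient = n // 10
--         remainder = n % 10
--         n = quotient
--         ans = ans * 10 + remainder
--     limit = 1 << 31
--     if is_negative:
--         ans = -ans
--     if (ans <= -limit) or (ans >= limit - 1):
--         return 0
--     return ans
-- ===== SOURCE B (Python) =====
-- def reverse32bitsignedint(n):
--     # Walk the decimal string of abs(n) front to back, giving the leading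
--     # digit the lowest place value: no arithmetic digit-extraction loop.
--     ans = 0
--     place = 1
--     for c in str(abs(n)):
--         ans += (ord(c) - 48) * place
--         place *= 10
--     if n < 0:
--         ans = -ans
--     limit = 1 << 31
--     if ans <= -limit or ans >= limit - 1:
--         return 0
--     return ans
-- ===== Notes on version B (the rewrite author's own statement) =====
-- stated objective: alternative
-- what changed: Replaces A's floor-division/modulus while-loop (digit extraction with Horner accumulation) by a single forward pass over the decimal string of the absolute value, multiplying each character's digit by a growing place value, keeping A's exact overflow clamp.
import Mathlib
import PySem

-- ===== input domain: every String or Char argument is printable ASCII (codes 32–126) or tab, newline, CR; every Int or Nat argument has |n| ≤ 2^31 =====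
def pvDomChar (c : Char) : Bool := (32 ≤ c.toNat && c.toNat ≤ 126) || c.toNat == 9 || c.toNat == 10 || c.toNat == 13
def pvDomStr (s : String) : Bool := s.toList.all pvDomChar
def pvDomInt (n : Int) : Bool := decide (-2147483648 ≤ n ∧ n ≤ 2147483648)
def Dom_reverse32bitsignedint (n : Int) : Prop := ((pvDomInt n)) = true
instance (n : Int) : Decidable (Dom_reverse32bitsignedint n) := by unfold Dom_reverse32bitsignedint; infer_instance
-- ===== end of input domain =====

-- B replaces A's //10,%10 Horner while-loop by one forward pass over the decimal
-- string of abs(n) with a running power-of-ten place value (objective: alternative).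

-- ===== PORT A =====
-- A's `while n:` loop; after the sign branch n ≥ 0, so a Nat-state loop is exact
-- (Python's // and % agree with Nat division/mod on nonnegative operands).
def pvLoopA : Nat → Int → Int
  | 0, ans => ans
  | m + 1, ans => pvLoopA ((m + 1) / 10) (ans * 10 + ((m + 1) % 10 : Nat))
  decreasing_by exact Nat.div_lt_self (Nat.succ_pos m) (by norm_num)

def reverse32bitsignedint (n : Int) : Int :=
  -- is_negative = 0; if n < 0: is_negative = 1; n = -n
  let st := if n < 0 then ((1 : Int), -n) else ((0 : Int), n)
  -- while n: quotient/remainder loop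
  let ans := pvLoopA st.2.toNat 0
  let limit : Int := 2 ^ 31          -- 1 << 31
  let ans := if st.1 ≠ 0 then -ans else ans   -- `if is_negative:` (truthiness)
  if ans ≤ -limit ∨ ans ≥ limit - 1 then 0 else ans

-- ===== PORT B =====
def reverse32bitsignedint_alt (n : Int) : Int :=
  -- for c in str(abs(n)): ans += (ord(c) - 48) * place; place *= 10
  let s := PySem.Int.toStr (if n < 0 then -n else n)
  let r := s.toList.foldl
    (fun (ap : Int × Int) c => (ap.1 + ((c.toNat : Int) - 48) * ap.2, ap.2 * 10)) (0, 1)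
  let ans := if n < 0 then -r.1 else r.1
  let limit : Int := 2 ^ 31
  if ans ≤ -limit ∨ ans ≥ limit - 1 then 0 else ans

-- ===== PRECONDITION & SPEC =====
def Spec_reverse32bitsignedint (n : Int) (out : Int) : Prop := out = reverse32bitsignedint_alt n
instance (n : Int) (out : Int) : Decidable (Spec_reverse32bitsignedint n out) := by unfold Spec_reverse32bitsignedint; infer_instance

-- ===== CLAIM (what is proved, stated in full; the proofs are below) =====
def Claim_equal_reverse32bitsignedint : Prop := ∀ (n : Int), Dom_reverse32bitsignedint n → Spec_reverse32bitsignedint n (reverse32bitsignedint n)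

-- ===== LEMMAS AND PROOFS =====

lemma pvLoopA_zero (a : Int) : pvLoopA 0 a = a := by simp [pvLoopA]

lemma pvLoopA_step (m : Nat) (h : m ≠ 0) (a : Int) :
    pvLoopA m a = pvLoopA (m / 10) (a * 10 + ((m % 10 : Nat) : Int)) := by
  cases m with
  | zero => exact absurd rfl h
  | succ k => rw [pvLoopA]

lemma pvLoopA_small (m : Nat) (h : m < 10) : pvLoopA m 0 = m := by
  cases m with
  | zero => simp [pvLoopA]
  | succ k =>
    rw [pvLoopA_step _ (Nat.succ_ne_zero k)]
    rw [Nat.div_eq_of_lt h, Nat.mod_eq_of_lt h, pvLoopA_zero]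
    simp

lemma pvLoopA_acc (m : Nat) (hm : 1 ≤ m) (a : Int) :
    pvLoopA m a = a * 10 ^ (Nat.toDigits 10 m).length + pvLoopA m 0 := by
  induction m using Nat.strong_induction_on generalizing a with
  | _ m ih =>
    by_cases h10 : m < 10
    · rw [pvLoopA_step m (by omega) a, Nat.div_eq_of_lt h10, Nat.mod_eq_of_lt h10,
        pvLoopA_zero, pvLoopA_small m h10, Nat.toDigits_of_lt_base h10]
      simp
    · have hq : 1 ≤ m / 10 := Nat.le_div_iff_mul_le (by norm_num) |>.mpr (by omega)
      have hlt : m / 10 < m := Nat.div_lt_self (by omega) (by norm_num)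
      have hL : (Nat.toDigits 10 m).length = (Nat.toDigits 10 (m / 10)).length + 1 := by
        rw [Nat.toDigits_of_base_le (by norm_num) (by omega)]; simp
      have h1 := ih (m / 10) hlt hq (a * 10 + ((m % 10 : Nat) : Int))
      have h2 := ih (m / 10) hlt hq ((0 : Int) * 10 + ((m % 10 : Nat) : Int))
      rw [pvLoopA_step m (by omega) a, pvLoopA_step m (by omega) 0, h1, h2, hL]
      ring

lemma digitChar_val (r : Nat) (h : r < 10) : ((Nat.digitChar r).toNat : Int) - 48 = r := by
  interval_cases r <;> rfl

lemma foldB (m : Nat) (a p : Int) :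
    (Nat.toDigits 10 m).foldl
      (fun (ap : Int × Int) c => (ap.1 + ((c.toNat : Int) - 48) * ap.2, ap.2 * 10)) (a, p)
      = (a + p * pvLoopA m 0, p * 10 ^ (Nat.toDigits 10 m).length) := by
  induction m using Nat.strong_induction_on generalizing a p with
  | _ m ih =>
    by_cases h10 : m < 10
    · rw [Nat.toDigits_of_lt_base h10, pvLoopA_small m h10]
      simp [digitChar_val m h10]; ring
    · have hq : 1 ≤ m / 10 := Nat.le_div_iff_mul_le (by norm_num) |>.mpr (by omega)
      have hlt : m / 10 < m := Nat.div_lt_self (by omega) (by norm_num)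
      have hsplit : pvLoopA m 0 =
          ((m % 10 : Nat) : Int) * 10 ^ (Nat.toDigits 10 (m / 10)).length + pvLoopA (m / 10) 0 := by
        rw [pvLoopA_step m (by omega) 0, pvLoopA_acc (m / 10) hq]
        simp
      rw [Nat.toDigits_of_base_le (by norm_num) (by omega), List.foldl_append,
        ih (m / 10) hlt a p, List.foldl_cons, List.foldl_nil, List.length_append,
        digitChar_val (m % 10) (Nat.mod_lt m (by norm_num)), hsplit]
      simp only [Prod.mk.injEq, List.length_cons, List.length_nil]
      constructor <;> ring

lemma abs_eq_natAbs (n : Int) : (if n < 0 then -n else n) = (n.natAbs : Int) := by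
  split <;> omega

lemma toList_toStr_natAbs (n : Int) :
    (PySem.Int.toStr ((n.natAbs : Nat) : Int)).toList = Nat.toDigits 10 n.natAbs := by
  have h : ¬ ((n.natAbs : Int) < 0) := by omega
  rw [PySem.Int.toList_toStr]
  simp only [PySem.Int.toChars]
  rw [if_neg h, Int.toNat_natCast]

-- ===== VERDICT (by name: the statement is the Claim_ definition above) =====
theorem reverse32bitsignedint_spec : Claim_equal_reverse32bitsignedint := by
  intro n _
  unfold Spec_reverse32bitsignedint reverse32bitsignedint reverse32bitsignedint_alt
  dsimp only
  rw [abs_eq_natAbs, toList_toStr_natAbs, foldB n.natAbs 0 1]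
  by_cases hn : n < 0
  · simp only [hn, if_pos]
    have : ((-n).toNat : Nat) = n.natAbs := by omega
    simp [this]
  · simp only [hn, if_false]
    have : (n.toNat : Nat) = n.natAbs := by omega
    simp [this]
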